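-- pv_equiv track=rewrite | github.com/yasir2000/ArchiAgents | togaf_framework/model_generation/engine.py | _generate_technology_elements
-- ===== SOURCE A (Python) =====
-- from typing import Dict, List, Any, Optional
--
-- def _generate_technology_elements(context: Dict[str, Any], use_ai: bool) -> List[Dict[str, Any]]:
--     """Generate technology layer elements (nodes, devices, networks)"""
--     elements = []
--
--     # Technology services
--     tech_services = context.get("technology_services", [
--         "Database Service",
--         "API Gateway",
--         "Message Queue",
--         "Cache Service"
--     ])
--
--     for svc in tech_services:
--         elements.append({
--             "id": f"tech_svc_{svc.lower().replace(' ', '_')}",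
--             "type": "technology_service",
--             "name": svc,
--             "description": f"Technology service: {svc}"
--         })
--
--     # Nodes
--     nodes = context.get("nodes", [
--         "Web Server",
--         "Application Server",
--         "Database Server",
--         "Message Broker"
--     ])
--
--     for node in nodes:
--         elements.append({
--             "id": f"node_{node.lower().replace(' ', '_')}",
--             "type": "node",
--             "name": node,
--             "description": f"Technology node: {node}"
--         })
--
--     # System software
--     software = context.get("system_software", [
--         "Linux OS",
--         "PostgreSQL",
--         "Redis",
--         "Kubernetes"
--     ])
--
--     for sw in software:
--         elements.append({
--             "id": f"sw_{sw.lower().replace(' ', '_')}",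
--             "type": "system_software",
--             "name": sw,
--             "description": f"System software: {sw}"
--         })
--
--     return elements
-- ===== SOURCE B (Python) =====
-- def _generate_technology_elements(context, use_ai):
--     """Generate technology layer elements (nodes, devices, networks)"""
--
--     def build(names, make, tail):
--         # Recursively cons one element per name onto the already-built tail.
--         if not names:
--             return tail
--         return [make(names[0])] + build(names[1:], make, tail)
--
--     def element(prefix, typ, desc):
--         return lambda name: {
--             "id": prefix + name.lower().replace(" ", "_"),
--             "type": typ,
--             "name": name,
--             "description": desc + name,
--         }
--
--     # Build the result back-to-front: system software first (innermost tail),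
--     # then nodes, then technology services on the outside.
--     return build(
--         context.get("technology_services",
--                     ["Database Service", "API Gateway", "Message Queue", "Cache Service"]),
--         element("tech_svc_", "technology_service", "Technology service: "),
--         build(
--             context.get("nodes",
--                         ["Web Server", "Application Server", "Database Server", "Message Broker"]),
--             element("node_", "node", "Technology node: "),
--             build(
--                 context.get("system_software",
--                             ["Linux OS", "PostgreSQL", "Redis", "Kubernetes"]),
--                 element("sw_", "system_software", "System software: "),
--                 [])))
-- ===== Notes on version B (the rewrite author's own statement) =====
-- stated objective: alternative
-- what changed: Replaces A's three forward append-to-accumulator loops with a recursive cons-based builder that constructs the list back-to-front (software, then nodes, then services) by nesting tails, with element construction factored into a closure.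
import Mathlib
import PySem

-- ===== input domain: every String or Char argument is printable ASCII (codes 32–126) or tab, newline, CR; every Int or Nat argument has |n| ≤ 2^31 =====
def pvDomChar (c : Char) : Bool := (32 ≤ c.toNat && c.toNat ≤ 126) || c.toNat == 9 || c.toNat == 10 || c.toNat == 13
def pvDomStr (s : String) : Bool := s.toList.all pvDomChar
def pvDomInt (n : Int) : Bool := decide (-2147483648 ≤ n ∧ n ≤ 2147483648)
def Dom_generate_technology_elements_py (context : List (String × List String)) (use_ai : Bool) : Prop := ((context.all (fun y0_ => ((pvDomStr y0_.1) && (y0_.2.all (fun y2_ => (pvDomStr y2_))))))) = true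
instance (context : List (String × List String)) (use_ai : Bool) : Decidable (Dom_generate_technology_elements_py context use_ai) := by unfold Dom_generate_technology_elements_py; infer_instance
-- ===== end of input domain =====

-- B replaces A's three forward append loops with a recursive cons builder assembling the result back-to-front (alternative decomposition; same value).


-- ===== PORT A =====
def generate_technology_elements_py (context : List (String × List String)) (use_ai : Bool) : List (List (String × String)) :=
  let elements : List (List (String × String)) := []
  let tech_services := (PySem.Dict.mk context).getD "technology_services"
    ["Database Service", "API Gateway", "Message Queue", "Cache Service"]
  let elements := tech_services.foldl (fun acc svc =>
    acc ++ [[("id", "tech_svc_" ++ PySem.Str.replace (PySem.Str.lower svc) " " "_"),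
             ("type", "technology_service"), ("name", svc),
             ("description", "Technology service: " ++ svc)]]) elements
  let nodes := (PySem.Dict.mk context).getD "nodes"
    ["Web Server", "Application Server", "Database Server", "Message Broker"]
  let elements := nodes.foldl (fun acc node =>
    acc ++ [[("id", "node_" ++ PySem.Str.replace (PySem.Str.lower node) " " "_"),
             ("type", "node"), ("name", node),
             ("description", "Technology node: " ++ node)]]) elements
  let software := (PySem.Dict.mk context).getD "system_software"
    ["Linux OS", "PostgreSQL", "Redis", "Kubernetes"]
  let elements := software.foldl (fun acc sw =>
    acc ++ [[("id", "sw_" ++ PySem.Str.replace (PySem.Str.lower sw) " " "_"),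
             ("type", "system_software"), ("name", sw),
             ("description", "System software: " ++ sw)]]) elements
  elements

-- ===== PORT B =====
-- B: recursive cons-based builder; the result is assembled back-to-front by nesting tails.
def pvBuild_generate_technology_elements (names : List String)
    (make : String → List (String × String))
    (tail : List (List (String × String))) : List (List (String × String)) :=
  match names with
  | [] => tail
  | h :: t => [make h] ++ pvBuild_generate_technology_elements t make tail

def pvElement_generate_technology_elements (prefix_ typ desc : String) :
    String → List (String × String) :=
  fun name =>
    [("id", prefix_ ++ PySem.Str.replace (PySem.Str.lower name) " " "_"),
     ("type", typ), ("name", name), ("description", desc ++ name)]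

def generate_technology_elements_py_alt (context : List (String × List String)) (use_ai : Bool) : List (List (String × String)) :=
  pvBuild_generate_technology_elements
    ((PySem.Dict.mk context).getD "technology_services"
      ["Database Service", "API Gateway", "Message Queue", "Cache Service"])
    (pvElement_generate_technology_elements "tech_svc_" "technology_service" "Technology service: ")
    (pvBuild_generate_technology_elements
      ((PySem.Dict.mk context).getD "nodes"
        ["Web Server", "Application Server", "Database Server", "Message Broker"])
      (pvElement_generate_technology_elements "node_" "node" "Technology node: ")
      (pvBuild_generate_technology_elements
        ((PySem.Dict.mk context).getD "system_software"
          ["Linux OS", "PostgreSQL", "Redis", "Kubernetes"])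
        (pvElement_generate_technology_elements "sw_" "system_software" "System software: ")
        []))

-- ===== PRECONDITION & SPEC =====
def Spec_generate_technology_elements_py (context : List (String × List String)) (use_ai : Bool) (out : List (List (String × String))) : Prop := out = generate_technology_elements_py_alt context use_ai
instance (context : List (String × List String)) (use_ai : Bool) (out : List (List (String × String))) : Decidable (Spec_generate_technology_elements_py context use_ai out) := by unfold Spec_generate_technology_elements_py; infer_instance

-- ===== CLAIM (what is proved, stated in full; the proofs are below) =====
def Claim_equal_generate_technology_elements_py : Prop := ∀ (context : List (String × List String)) (use_ai : Bool), Dom_generate_technology_elements_py context use_ai → Spec_generate_technology_elements_py context use_ai (generate_technology_elements_py context use_ai)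

-- ===== LEMMAS AND PROOFS =====
-- B's recursive builder equals map-then-append.
theorem pvBuild_eq_map_append (names : List String)
    (make : String → List (String × String)) (tail : List (List (String × String))) :
    pvBuild_generate_technology_elements names make tail = names.map make ++ tail := by
  induction names with
  | nil => rfl
  | cons h t ih => simp [pvBuild_generate_technology_elements, ih]

-- A's append-singleton foldl equals prior accumulator ++ map.
theorem pv_foldl_append_map (names : List String)
    (make : String → List (String × String)) (acc : List (List (String × String))) :
    names.foldl (fun a x => a ++ [make x]) acc = acc ++ names.map make := by
  induction names generalizing acc with
  | nil => simp
  | cons h t ih => simp [List.foldl, ih]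

-- ===== VERDICT (by name: the statement is the Claim_ definition above) =====
theorem generate_technology_elements_py_spec : Claim_equal_generate_technology_elements_py := by
  intro context use_ai _
  unfold Spec_generate_technology_elements_py generate_technology_elements_py
    generate_technology_elements_py_alt
  simp only [pvBuild_eq_map_append, pv_foldl_append_map]
  unfold pvElement_generate_technology_elements
  simp [List.append_assoc]
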